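-- pv_equiv track=rewrite | github.com/TheRealMolen/mcalc | tools/packfont.py | emit_row
-- ===== SOURCE A (Python) =====
-- def emit_row(row, width):
--     if width > 8:
--         return (
--             emit_row(row >> 8, width - 8) +
--             ' ' +
--             emit_row(row & 0xff, 8) )
--
--     s = '0b'
--     msk = 1 << (width-1)
--     while msk > 0:
--         s += '1' if ((msk & row) == msk) else '0'
--         msk = msk >> 1
--     s += ','
--     return s
-- ===== SOURCE B (Python) =====
-- def emit_row(row, width):
--     # iterative: compute the chunk layout first, then render each chunk LSB-first
--     top = ((width - 1) % 8) + 1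
--     nchunks = (width - top) // 8
--     chunks = []
--     shift = width
--     for w in [top] + [8] * nchunks:
--         shift -= w
--         v = (row >> shift) & ((1 << w) - 1)
--         bits = ''
--         while w > 0:
--             bits = ('1' if v & 1 else '0') + bits
--             v >>= 1
--             w -= 1
--         chunks.append('0b' + bits + ',')
--     return ' '.join(chunks)
-- ===== Notes on version B (the rewrite author's own statement) =====
-- stated objective: faster
-- what changed: A splits the row recursively into a high part and a low byte and rebuilds the result by repeatedly concatenating recursive results (re-copying the growing string); B is iterative: it first computes the chunk layout (a top chunk of ((width-1)%8)+1 bits followed by (width-top)//8 byte chunks), renders each chunk LSB-first from the shifted-and-masked row, and joins all chunk strings once with ' '.join.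
-- outside the precondition, e.g. on emit_row(3, 0): A raises ValueError, B raises ValueError
import Mathlib
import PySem

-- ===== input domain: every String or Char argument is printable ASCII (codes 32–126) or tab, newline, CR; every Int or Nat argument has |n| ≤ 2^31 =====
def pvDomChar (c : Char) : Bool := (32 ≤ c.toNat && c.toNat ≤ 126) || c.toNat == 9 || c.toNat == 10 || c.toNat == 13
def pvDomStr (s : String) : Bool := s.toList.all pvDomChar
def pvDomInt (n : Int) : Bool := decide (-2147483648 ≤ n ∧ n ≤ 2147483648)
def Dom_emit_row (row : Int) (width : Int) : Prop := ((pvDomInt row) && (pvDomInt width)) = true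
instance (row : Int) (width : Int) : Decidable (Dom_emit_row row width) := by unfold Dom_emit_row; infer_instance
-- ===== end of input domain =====

-- B replaces A's recursive 8-bit splitting by an iterative pass: compute the chunk layout first,
-- then render each chunk LSB-first from the shifted row; objective: faster (one join instead of repeated concatenation of recursive results).


-- ===== PORT A =====
-- the 'while msk > 0' loop of A; s += '1' if ((msk & row) == msk) else '0'; msk >>= 1
def emitBits (row : Int) (msk : Int) (s : String) : String :=
  if 0 < msk then
    emitBits row (msk >>> (1 : Nat)) (s ++ (if PySem.Int.band msk row == msk then "1" else "0"))
  else s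
termination_by msk.toNat
decreasing_by
  have : msk >>> (1 : Nat) = msk / 2 ^ 1 := Int.shiftRight_eq_div_pow msk 1
  omega

def emit_row (row : Int) (width : Int) : String :=
  if 8 < width then
    emit_row (row >>> (8 : Nat)) (width - 8) ++ " " ++ emit_row (PySem.Int.band row 255) 8
  else
    -- '1 << (width-1)' ported via (width-1).toNat: exact for width ≥ 1 (Pre_); Python raises for width ≤ 0
    emitBits row ((1 : Int) <<< (width - 1).toNat) "0b" ++ ","
termination_by width.toNat
decreasing_by all_goals omega

-- ===== PORT B =====
-- the 'while w > 0' loop of B: bits = ('1' if v & 1 else '0') + bits; v >>= 1; w -= 1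
def binstrLoop (v : Int) (w : Int) (s : String) : String :=
  if 0 < w then
    binstrLoop (v >>> (1 : Nat)) (w - 1) ((if PySem.Int.band v 1 != 0 then "1" else "0") ++ s)
  else s
termination_by w.toNat
decreasing_by omega

def emit_row_alt (row : Int) (width : Int) : String :=
  let top := PySem.Int.mod (width - 1) 8 + 1
  let nchunks := PySem.Int.floordiv (width - top) 8
  -- '[8] * nchunks' is empty for negative nchunks, exactly as .toNat clamps;
  -- 'row >> shift' / '1 << w' ported via .toNat: exact on Pre_ (shift, w ≥ 0 there; Python raises on a negative count)
  let fin := (top :: List.replicate nchunks.toNat 8).foldl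
    (fun (st : Int × List String) w =>
      let shift := st.1 - w
      let v := PySem.Int.band (row >>> shift.toNat) (((1 : Int) <<< w.toNat) - 1)
      (shift, st.2 ++ ["0b" ++ binstrLoop v w "" ++ ","]))
    (width, [])
  PySem.Str.join " " fin.2

-- ===== PRECONDITION & SPEC =====
-- Pre_ excludes width ≤ 0, where A raises ValueError from the negative shift '1 << (width-1)' (so does B).
def Pre_emit_row (row : Int) (width : Int) : Prop := 1 ≤ width
instance (row : Int) (width : Int) : Decidable (Pre_emit_row row width) := by unfold Pre_emit_row; infer_instance
def pvWitness_emit_row : Int × Int := (713, 10)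

def Spec_emit_row (row : Int) (width : Int) (out : String) : Prop := out = emit_row_alt row width
instance (row : Int) (width : Int) (out : String) : Decidable (Spec_emit_row row width out) := by unfold Spec_emit_row; infer_instance

-- ===== CLAIM (what is proved, stated in full; the proofs are below) =====
def Claim_equal_emit_row : Prop := ∀ (row : Int) (width : Int), Dom_emit_row row width → Pre_emit_row row width → Spec_emit_row row width (emit_row row width)

-- ===== LEMMAS AND PROOFS =====

-- canonical description shared by both ports: bit k of v, MSB-first bit strings, chunks
def bitCh (v : Int) (k : Nat) : Char := if (v >>> k) % 2 = 1 then '1' else '0'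

def bitsL (v : Int) : Nat → List Char
  | 0 => []
  | k + 1 => bitCh v k :: bitsL v k

def chunkL (row : Int) (sh : Int) (w : Int) : List Char :=
  '0' :: 'b' :: (bitsL (row >>> sh.toNat) w.toNat ++ [','])

def chunksL (row : Int) (sh : Int) : List Int → List (List Char)
  | [] => []
  | w :: ws => chunkL row (sh - w) w :: chunksL row (sh - w) ws

theorem neg_sub_one_emod (m p : Int) (hp : 0 < p) : (-m - 1) % p = p - 1 - m % p := by
  have h1 : -m - 1 = (p - 1 - m % p) + p * (-(m / p) - 1) := by
    linear_combination Int.mul_ediv_add_emod m p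
  have hr0 : 0 ≤ m % p := Int.emod_nonneg m (by omega)
  have hr1 : m % p < p := Int.emod_lt_of_pos m hp
  rw [h1, Int.add_mul_emod_self_left, Int.emod_eq_of_lt (by omega) (by omega)]

theorem cast_pow2 (n : Nat) : ((2:Int)^n) = ((2^n : Nat) : Int) := by push_cast; ring

theorem band_mask (x : Int) (n : Nat) : PySem.Int.band x (2 ^ n - 1) = x % 2 ^ n := by
  have h2 : (0:Int) < 2 ^ n := by positivity
  have ht : ((2:Int)^n - 1).toNat = 2^n - 1 := by have := cast_pow2 n; omega
  rcases le_or_gt 0 x with hx | hx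
  · rw [PySem.Int.band, if_pos hx, if_pos (by omega : (0:Int) ≤ 2^n - 1), ht,
      Nat.and_two_pow_sub_one_eq_mod]
    have hx' : x = (x.toNat : Int) := by omega
    rw [hx', cast_pow2]
    push_cast
    rfl
  · rw [PySem.Int.band, if_neg (by omega : ¬ (0:Int) ≤ x), if_pos (by omega : (0:Int) ≤ 2^n - 1), ht,
      Nat.and_comm, Nat.and_two_pow_sub_one_eq_mod]
    set m : Nat := (-x - 1).toNat with hm
    have hxm : x = -(m : Int) - 1 := by omega
    rw [hxm, neg_sub_one_emod _ _ h2]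
    have hmm : ((m:Int)) % 2^n = ((m % 2^n : Nat) : Int) := by rw [cast_pow2]; push_cast; rfl
    have hlt : m % 2^n < 2^n := Nat.mod_lt _ (by positivity)
    have := cast_pow2 n
    omega

theorem band_pow_eq (x : Int) (k : Nat) :
    (PySem.Int.band (2 ^ k) x = 2 ^ k) ↔ ((x >>> k) % 2 = 1) := by
  have h2 : (0:Int) < 2 ^ k := by positivity
  have h2n : (0:Nat) < 2 ^ k := by positivity
  have ht : ((2:Int)^k).toNat = 2^k := by have := cast_pow2 k; omega
  have hsr : x >>> k = x / 2^k := by rw [Int.shiftRight_eq_div_pow]; norm_cast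
  have hc2 := cast_pow2 k
  rcases le_or_gt 0 x with hx | hx
  · rw [PySem.Int.band, if_pos (by omega), if_pos hx, ht]
    have hand : 2^k &&& x.toNat = (x.toNat.testBit k).toNat * 2^k := by
      rw [Nat.and_comm]; exact Nat.and_two_pow _ _
    have htb : x.toNat.testBit k = decide (x.toNat / 2^k % 2 = 1) := Nat.testBit_eq_decide_div_mod_eq
    have key : x / 2^k = ((x.toNat / 2^k : Nat) : Int) := by
      conv_lhs => rw [(by omega : x = (x.toNat : Int)), hc2]
      push_cast; rfl
    rw [hand, htb, hsr, key]
    set q : Nat := x.toNat / 2^k with hqdef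
    by_cases hb : q % 2 = 1
    · simp only [hb, decide_true, Bool.toNat_true, one_mul]
      constructor
      · intro _; omega
      · intro _; rw [← hc2]
    · simp only [hb, decide_false, Bool.toNat_false, zero_mul, Nat.cast_zero]
      constructor <;> intro h
      · exfalso; omega
      · exfalso; omega
  · rw [PySem.Int.band, if_pos (by omega), if_neg (by omega), ht]
    set m : Nat := (-x - 1).toNat with hm
    have hxm : x = -(m : Int) - 1 := by omega
    have hand : 2^k &&& m = (m.testBit k).toNat * 2^k := by
      rw [Nat.and_comm]; exact Nat.and_two_pow _ _
    have htb : m.testBit k = decide (m / 2^k % 2 = 1) := Nat.testBit_eq_decide_div_mod_eq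
    have hq : x / 2^k = -((m:Int) / 2^k) - 1 := by
      rw [hxm]
      have h1 : -(m:Int) - 1 = (2^k - 1 - (m:Int) % 2^k) + 2^k * (-((m:Int)/2^k) - 1) := by
        linear_combination Int.mul_ediv_add_emod (m:Int) ((2:Int)^k)
      rw [h1, Int.add_mul_ediv_left _ _ (by omega : (2:Int)^k ≠ 0)]
      have h3 := Int.emod_nonneg (m:Int) (by omega : (2:Int)^k ≠ 0)
      have h4 := Int.emod_lt_of_pos (m:Int) h2
      rw [Int.ediv_eq_zero_of_lt (by omega) (by omega)]
      omega
    have hcast : ((m:Int)) / 2^k = ((m / 2^k : Nat) : Int) := by rw [hc2]; push_cast; rfl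
    rw [hand, htb, hsr, hq, hcast]
    set q : Nat := m / 2^k with hqdef
    by_cases hb : q % 2 = 1
    · simp only [hb, decide_true, Bool.toNat_true, one_mul, Nat.sub_self, Nat.cast_zero]
      constructor <;> intro h <;> exfalso <;> omega
    · simp only [hb, decide_false, Bool.toNat_false, zero_mul, Nat.sub_zero]
      constructor
      · intro _; omega
      · intro _; rw [← hc2]

theorem srdiv (x : Int) (k : Nat) : x >>> k = x / 2^k := by
  rw [Int.shiftRight_eq_div_pow]; norm_cast

theorem emod_pow_div (x : Int) (k n : Nat) (h : k ≤ n) :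
    (x % 2 ^ n) / 2^k = (x / 2^k) % 2 ^ (n - k) := by
  have hk : ((2:Int)^k) ≠ 0 := by positivity
  have hmul : (2:Int)^k * 2^(n-k) = 2^n := by rw [← pow_add]; congr 1; omega
  have hdd : x / 2^k / 2^(n-k) = x / 2^n := by
    rw [Int.ediv_ediv_of_nonneg (by positivity), hmul]
  have hlhs : x % 2^n = x + (-(2^(n-k) * (x / 2^n))) * 2^k := by
    rw [Int.emod_def, ← hmul]; ring
  rw [hlhs, Int.add_mul_ediv_right _ _ hk, Int.emod_def, hdd]
  ring

theorem bitCh_mask (x : Int) (k n : Nat) (h : k < n) : bitCh (x % 2^n) k = bitCh x k := by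
  unfold bitCh
  rw [srdiv, srdiv, emod_pow_div x k n (by omega)]
  have : (2:Int) ∣ 2^(n-k) := dvd_pow_self 2 (by omega)
  rw [Int.emod_emod_of_dvd _ this]

theorem bitCh_shift (v : Int) (k : Nat) : bitCh (v >>> (1 : Nat)) k = bitCh v (k + 1) := by
  unfold bitCh
  rw [← Int.shiftRight_add, Nat.add_comm]

theorem bitsL_mask (x : Int) (n : Nat) : bitsL (x % 2 ^ n) n = bitsL x n := by
  suffices h : ∀ m, m ≤ n → bitsL (x % 2 ^ n) m = bitsL x m from h n le_rfl
  intro m hm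
  induction m with
  | zero => rfl
  | succ j ih => rw [bitsL, bitsL, bitCh_mask x j n (by omega), ih (by omega)]

theorem bitsL_shift (v : Int) (n : Nat) : bitsL v (n + 1) = bitsL (v >>> (1 : Nat)) n ++ [bitCh v 0] := by
  induction n generalizing v with
  | zero => simp [bitsL]
  | succ j ih =>
    rw [bitsL, ih v, bitsL, bitCh_shift]
    rfl

theorem emitBits_spec (k : Nat) : ∀ (row : Int) (s : String),
    (emitBits row (2 ^ k) s).toList = s.toList ++ bitsL row (k + 1) := by
  induction k with
  | zero =>
    intro row s
    rw [pow_zero, emitBits, if_pos (by omega : (0:Int) < 1),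
      (by decide : ((1:Int) >>> (1:Nat)) = 0), emitBits, if_neg (by omega)]
    have hbp := band_pow_eq row 0
    rw [pow_zero, Int.shiftRight_zero] at hbp
    rw [String.toList_append]
    by_cases hb : row % 2 = 1 <;>
      simp [beq_iff_eq, hbp, hb, bitsL, bitCh, Int.shiftRight_zero]
  | succ j ih =>
    intro row s
    have hms : ((2:Int)^(j+1)) >>> (1:Nat) = 2^j := by
      rw [srdiv, pow_one, pow_succ, Int.mul_ediv_cancel _ (by omega : (2:Int) ≠ 0)]
    rw [emitBits, if_pos (by positivity : (0:Int) < 2^(j+1)), hms, ih, String.toList_append]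
    have hbp := band_pow_eq row (j+1)
    by_cases hb : (row >>> (j+1 : Nat)) % 2 = 1 <;>
      simp [beq_iff_eq, hbp, hb, bitsL, bitCh]

theorem binstrLoop_spec (n : Nat) : ∀ (v w : Int) (s : String), w.toNat = n →
    (binstrLoop v w s).toList = bitsL v n ++ s.toList := by
  induction n with
  | zero =>
    intro v w s h
    rw [binstrLoop, if_neg (by omega)]
    simp [bitsL]
  | succ j ih =>
    intro v w s h
    rw [binstrLoop, if_pos (by omega), ih _ _ _ (by omega), bitsL_shift, String.toList_append]
    have h0 : v >>> (0 : Nat) = v := Int.shiftRight_zero v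
    by_cases hb : v % 2 = 1 <;>
      simp [PySem.Int.band_one, hb, bitCh, h0]

theorem join_append (cs : List (List Char)) (c : List Char) (h : cs ≠ []) :
    PySem.Chars.join [' '] (cs ++ [c]) = PySem.Chars.join [' '] cs ++ ' ' :: c := by
  induction cs with
  | nil => exact absurd rfl h
  | cons x t ih =>
    cases t with
    | nil => simp [PySem.Chars.join_cons_cons, PySem.Chars.join_singleton]
    | cons y t' =>
      have := ih (by simp)
      simp only [List.cons_append, PySem.Chars.join_cons_cons] at *
      simp [this]

theorem chunksL_append (row : Int) (ws ws' : List Int) : ∀ (sh : Int),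
    chunksL row sh (ws ++ ws') = chunksL row sh ws ++ chunksL row (sh - ws.sum) ws' := by
  induction ws with
  | nil => intro sh; simp [chunksL]
  | cons w t ih =>
    intro sh
    simp only [List.cons_append, chunksL, List.sum_cons, ih (sh - w), List.cons_append]
    rw [sub_sub]

theorem chunkL_shift (row : Int) (a w : Int) (h : 8 ≤ a) :
    chunkL row a w = chunkL (row >>> (8 : Nat)) (a - 8) w := by
  unfold chunkL
  rw [← Int.shiftRight_add, (by omega : 8 + (a - 8).toNat = a.toNat)]

theorem chunksL_shift (row : Int) (ws : List Int) : ∀ (sh : Int),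
    (∀ w ∈ ws, 0 ≤ w) → 8 ≤ sh - ws.sum →
    chunksL row sh ws = chunksL (row >>> (8 : Nat)) (sh - 8) ws := by
  induction ws with
  | nil => intro sh _ _; rfl
  | cons w t ih =>
    intro sh hnn hsum
    have htn : 0 ≤ t.sum := List.sum_nonneg (fun x hx => hnn x (by simp [hx]))
    have hw : 0 ≤ w := hnn w (by simp)
    rw [List.sum_cons] at hsum
    simp only [chunksL]
    rw [chunkL_shift row (sh - w) w (by omega), ih (sh - w) (fun x hx => hnn x (by simp [hx])) (by omega)]
    rw [(by ring : sh - w - 8 = sh - 8 - w)]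

theorem bfold (row : Int) (ws : List Int) : ∀ (sh : Int) (cs : List String),
    ((ws.foldl
      (fun (st : Int × List String) w =>
        let shift := st.1 - w
        let v := PySem.Int.band (row >>> shift.toNat) (((1 : Int) <<< w.toNat) - 1)
        (shift, st.2 ++ ["0b" ++ binstrLoop v w "" ++ ","]))
      (sh, cs)).2).map String.toList = cs.map String.toList ++ chunksL row sh ws := by
  induction ws with
  | nil => intro sh cs; simp [chunksL]
  | cons w t ih =>
    intro sh cs
    rw [List.foldl_cons]
    simp only []
    rw [ih]
    have hmask : ((1 : Int) <<< w.toNat) - 1 = 2 ^ w.toNat - 1 := by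
      rw [Int.shiftLeft_eq, one_mul]
    have hstr : ("0b" ++ binstrLoop (PySem.Int.band (row >>> (sh - w).toNat)
        (((1 : Int) <<< w.toNat) - 1)) w "" ++ ",").toList = chunkL row (sh - w) w := by
      rw [String.toList_append, String.toList_append,
        binstrLoop_spec w.toNat _ w "" rfl, hmask, band_mask, bitsL_mask]
      simp [chunkL, (by decide : "0b".toList = ['0','b']), (by decide : ",".toList = [',']),
        (by decide : "".toList = ([] : List Char))]
    simp [chunksL, hstr]

theorem acanon : ∀ (N : Nat) (row width : Int), width.toNat = N → 1 ≤ width →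
    (emit_row row width).toList =
      PySem.Chars.join [' ']
        (chunksL row width
          ((PySem.Int.mod (width - 1) 8 + 1) ::
            List.replicate (PySem.Int.floordiv (width - (PySem.Int.mod (width - 1) 8 + 1)) 8).toNat 8)) := by
  intro N
  induction N using Nat.strong_induction_on with
  | _ N ih =>
  intro row width hN h1
  have hm : PySem.Int.mod (width - 1) 8 = (width - 1) % 8 :=
    PySem.Int.mod_eq_emod_of_pos (by omega)
  have hf : ∀ a : Int, PySem.Int.floordiv a 8 = a / 8 := fun a =>
    PySem.Int.floordiv_eq_ediv_of_pos (by omega)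
  have ht0 : 0 ≤ (width - 1) % 8 := Int.emod_nonneg _ (by omega)
  have ht8 : (width - 1) % 8 < 8 := Int.emod_lt_of_pos _ (by omega)
  by_cases hle : width ≤ 8
  · -- single chunk
    have htw : (width - 1) % 8 = width - 1 := Int.emod_eq_of_lt (by omega) (by omega)
    rw [emit_row, if_neg (by omega), hm, htw, hf]
    have hz : width - (width - 1 + 1) = 0 := by ring
    rw [hz, (by decide : (0:Int) / 8 = 0)]
    simp only [Int.toNat_zero, List.replicate_zero]
    rw [String.toList_append, Int.shiftLeft_eq, one_mul,
      emitBits_spec ((width - 1).toNat) row "0b",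
      (by omega : (width - 1).toNat + 1 = width.toNat)]
    simp [chunksL, chunkL, PySem.Chars.join_singleton, Int.shiftRight_zero,
      (by decide : "0b".toList = ['0','b']), (by decide : ",".toList = [','])]
  · -- split off the low 8 bits
    rw [emit_row, if_pos (by omega)]
    have hqr := Int.mul_ediv_add_emod (width - 1) 8
    set q := (width - 1) / 8 with hqdef
    set r := (width - 1) % 8 with hrdef
    have hq1 : 1 ≤ q := by omega
    have ih1 := ih (width - 8).toNat (by omega) (row >>> (8 : Nat)) (width - 8) rfl (by omega)
    have ih2 := ih ((8 : Int)).toNat (by omega) (PySem.Int.band row 255) 8 rfl (by omega)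
    -- normalise ih1's layout
    have hm' : PySem.Int.mod (width - 8 - 1) 8 = r :=  by
      rw [PySem.Int.mod_eq_emod_of_pos (by omega),
        (by ring : width - 8 - 1 = (width - 1) - 8), Int.sub_emod_right, hrdef]
    have hdiv' : PySem.Int.floordiv (width - 8 - (r + 1)) 8 = q - 1 := by
      rw [hf, (by omega : width - 8 - (r + 1) = 8 * (q - 1)),
        Int.mul_ediv_cancel_left _ (by omega : (8:Int) ≠ 0)]
    rw [hm', hdiv'] at ih1
    -- normalise ih2 to a single chunk of row's low byte
    have hm2 : PySem.Int.mod ((8:Int) - 1) 8 = 7 := by decide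
    rw [hm2, (by norm_num : (8:Int) - (7 + 1) = 0), (by decide : PySem.Int.floordiv 0 8 = 0)] at ih2
    simp only [Int.toNat_zero, List.replicate_zero] at ih2
    have hlow : chunkL (PySem.Int.band row 255) 0 8 = chunkL row 0 8 := by
      unfold chunkL
      rw [(by decide : ((0:Int)).toNat = 0), (by decide : ((8:Int)).toNat = 8),
        Int.shiftRight_zero, Int.shiftRight_zero,
        (by norm_num : (255:Int) = 2 ^ 8 - 1), band_mask, bitsL_mask]
    simp only [chunksL] at ih2
    norm_num at ih2
    rw [hlow] at ih2
    -- assemble the right-hand side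
    rw [hm, hf, (by omega : width - (r + 1) = 8 * q),
      Int.mul_ediv_cancel_left _ (by omega : (8:Int) ≠ 0),
      (by omega : q.toNat = (q - 1).toNat + 1), List.replicate_succ',
      (by simp : (r + 1) :: (List.replicate (q - 1).toNat 8 ++ [8]) =
        ((r + 1) :: List.replicate (q - 1).toNat 8) ++ [8]),
      chunksL_append]
    have hsum : ((r + 1) :: List.replicate (q - 1).toNat 8).sum = width - 8 := by
      rw [List.sum_cons, List.sum_replicate, nsmul_eq_mul,
        (by omega : ((q - 1).toNat : Int) = q - 1)]
      omega
    rw [hsum, (by ring : width - (width - 8) = 8)]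
    rw [chunksL_shift row _ width
      (by
        intro w hw
        rcases List.mem_cons.mp hw with hw | hw
        · omega
        · rw [List.eq_of_mem_replicate hw]; omega)
      (by rw [hsum]; omega)]
    rw [(by simp [chunksL] : chunksL row 8 [8] = [chunkL row 0 8]),
      (by simp : chunksL (row >>> (8:Nat)) (width - 8) ((r + 1) :: List.replicate (q - 1).toNat 8) ++ [chunkL row 0 8]
        = chunksL (row >>> (8:Nat)) (width - 8) ((r + 1) :: List.replicate (q - 1).toNat 8) ++ [chunkL row 0 8]),
      join_append _ _ (by simp [chunksL])]
    rw [String.toList_append, String.toList_append, ih1, ih2,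
      (by decide : " ".toList = [' '])]
    simp [chunksL, chunkL]

theorem bcanon (row width : Int) :
    (emit_row_alt row width).toList =
      PySem.Chars.join [' ']
        (chunksL row width
          ((PySem.Int.mod (width - 1) 8 + 1) ::
            List.replicate (PySem.Int.floordiv (width - (PySem.Int.mod (width - 1) 8 + 1)) 8).toNat 8)) := by
  unfold emit_row_alt
  rw [PySem.Str.toList_join, bfold, (by decide : " ".toList = [' '])]
  simp

-- ===== VERDICT (by name: the statement is the Claim_ definition above) =====
theorem emit_row_spec : Claim_equal_emit_row := by
  intro row width _ hpre
  unfold Spec_emit_row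
  apply String.toList_inj.mp
  rw [acanon width.toNat row width rfl hpre, bcanon]
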